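-- pv_equiv track=rewrite | github.com/ranim-chikhrouhou/Esprit-PABI-4ERPBI5-2526-EventZella | ML/streamlit_app.py | _classif_order_columns
-- ===== SOURCE A (Python) =====
-- def _classif_order_columns(cols: list[str]) -> list[str]:
--     """Met en tête période / montants utiles à la lecture métier, puis le reste."""
--     head = []
--     for key in ("cal_year", "cal_month", "quarter", "final_price", "service_price", "event_budget"):
--         if key in cols and key not in head:
--             head.append(key)
--     tail = [c for c in cols if c not in head]
--     tail.sort(key=lambda x: (not str(x).lower().startswith("nb_"), str(x).lower()))
--     return head + tail
-- ===== SOURCE B (Python) =====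
-- _KEYS = ("cal_year", "cal_month", "quarter", "final_price", "service_price", "event_budget")
--
-- def _classif_order_columns(cols: list[str]) -> list[str]:
--     present = set(cols)
--     head = [k for k in _KEYS if k in present]
--     rest = [c for c in cols if c not in _KEYS]
--     nb = sorted((c for c in rest if c.lower().startswith("nb_")), key=str.lower)
--     other = sorted((c for c in rest if not c.lower().startswith("nb_")), key=str.lower)
--     return head + nb + other
-- ===== Notes on version B (the rewrite author's own statement) =====
-- stated objective: alternative
-- what changed: Replaces A's dedup append-loop plus one stable tuple-key sort of the tail by a three-bucket partition: priority keys filtered from the fixed tuple against set(cols), then the 'nb_' columns and the remaining columns each sorted independently by str.lower and concatenated.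
import Mathlib
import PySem

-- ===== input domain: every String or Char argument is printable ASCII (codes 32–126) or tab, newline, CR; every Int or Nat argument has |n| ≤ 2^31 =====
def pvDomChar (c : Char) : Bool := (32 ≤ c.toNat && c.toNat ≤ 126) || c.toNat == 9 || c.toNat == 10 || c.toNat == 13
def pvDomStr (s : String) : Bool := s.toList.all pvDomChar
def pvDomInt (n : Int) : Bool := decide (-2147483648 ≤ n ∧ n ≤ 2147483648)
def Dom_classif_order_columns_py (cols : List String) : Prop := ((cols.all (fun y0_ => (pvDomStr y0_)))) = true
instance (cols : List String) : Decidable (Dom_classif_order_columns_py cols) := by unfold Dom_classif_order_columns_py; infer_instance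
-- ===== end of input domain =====

-- B replaces A's head-dedup loop + single stable tuple-key sort of the tail by a three-bucket
-- partition (priority keys present, 'nb_' columns, the rest), each bucket ordered independently
-- and concatenated (alternative decomposition; same cost).

-- ===== PORT A =====
-- the priority tuple of A
def pvKeys : List String := ["cal_year", "cal_month", "quarter", "final_price", "service_price", "event_budget"]

def classif_order_columns_py (cols : List String) : List String :=
  let head := pvKeys.foldl (fun h key => if cols.contains key && !(h.contains key) then h ++ [key] else h) []
  let tail := cols.filter (fun c => !(head.contains c))
  -- tail.sort(key=lambda x: (not str(x).lower().startswith("nb_"), str(x).lower())) : stable tuple-key sort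
  let tail := PySem.List.sorted2 tail (fun x => !(PySem.Str.startswith (PySem.Str.lower x) "nb_")) (fun x => PySem.Str.lower x) false
  head ++ tail

-- ===== PORT B =====
def classif_order_columns_py_alt (cols : List String) : List String :=
  let present := PySem.Set.ofList cols
  let head := pvKeys.filter (fun k => present.contains k)
  let rest := cols.filter (fun c => !(pvKeys.contains c))
  let nb := PySem.List.sorted (rest.filter (fun c => PySem.Str.startswith (PySem.Str.lower c) "nb_")) (fun c => PySem.Str.lower c) false
  let other := PySem.List.sorted (rest.filter (fun c => !(PySem.Str.startswith (PySem.Str.lower c) "nb_"))) (fun c => PySem.Str.lower c) false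
  head ++ (nb ++ other)

-- ===== PRECONDITION & SPEC =====
def Spec_classif_order_columns_py (cols : List String) (out : List String) : Prop := out = classif_order_columns_py_alt cols
instance (cols : List String) (out : List String) : Decidable (Spec_classif_order_columns_py cols out) := by unfold Spec_classif_order_columns_py; infer_instance

-- ===== CLAIM (what is proved, stated in full; the proofs are below) =====
def Claim_equal_classif_order_columns_py : Prop := ∀ (cols : List String), Dom_classif_order_columns_py cols → Spec_classif_order_columns_py cols (classif_order_columns_py cols)

-- ===== LEMMAS AND PROOFS =====

-- A's head loop builds exactly the priority keys present in cols, in priority order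
theorem fold_head (cols : List String) :
    ∀ (ks acc : List String), ks.Nodup → (∀ k ∈ ks, k ∉ acc) →
      ks.foldl (fun h key => if cols.contains key && !(h.contains key) then h ++ [key] else h) acc
        = acc ++ ks.filter (fun k => cols.contains k) := by
  intro ks
  induction ks with
  | nil => simp
  | cons k ks ih =>
    intro acc hnd hdisj
    have hkacc : acc.contains k = false := by
      simpa using hdisj k (by simp)
    simp only [List.foldl_cons, List.filter_cons, hkacc]
    by_cases hc : cols.contains k
    · have hm : k ∈ cols := by simpa using hc
      rw [if_pos (by simp [hm])]
      rw [ih (acc ++ [k]) hnd.of_cons ?_]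
      · simp [hm]
      · intro k' hk'
        simp only [List.mem_append, List.mem_singleton]
        rintro (h | h)
        · exact hdisj k' (List.mem_cons_of_mem _ hk') h
        · exact (List.nodup_cons.mp hnd).1 (h ▸ hk')
    · have hm : k ∉ cols := by simpa using hc
      rw [if_neg (by simp [hm]), ih acc hnd.of_cons (fun k' hk' => hdisj k' (List.mem_cons_of_mem _ hk'))]
      simp [hm]

-- B's head comprehension names the same list: filtering pvKeys by membership in set(cols)
theorem head_alt (cols : List String) :
    pvKeys.filter (fun k => (PySem.Set.ofList cols).contains k)
      = pvKeys.filter (fun k => cols.contains k) := by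
  apply List.filter_congr
  intro k _
  simp [PySem.Set.contains, PySem.Set.mem_ofList]

-- both programs remove the same elements from cols (for c ∈ cols, c ∈ head ↔ c ∈ pvKeys)
theorem tail_eq (cols : List String) :
    cols.filter (fun c => !((pvKeys.filter (fun k => cols.contains k)).contains c))
      = cols.filter (fun c => !(pvKeys.contains c)) := by
  apply List.filter_congr
  intro c hc
  simp [List.mem_filter, hc]

-- insertion point only compares x with list elements: the comparison may be replaced pointwise
theorem insertBy_congr {α : Type} (b b' : α → α → Bool) (x : α) (L : List α)
    (h : ∀ l ∈ L, b x l = b' x l) : PySem.List.insertBy b x L = PySem.List.insertBy b' x L := by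
  induction L with
  | nil => rfl
  | cons y ys ih =>
    have hy := h y (by simp)
    simp only [PySem.List.insertBy, hy]
    by_cases hb : b' x y = true
    · simp [hb]
    · simp only [Bool.not_eq_true] at hb
      simp [hb, ih (fun l hl => h l (by simp [hl]))]

-- x goes before all of R: it is inserted within the left block
theorem insertBy_append_of_before {α : Type} (b : α → α → Bool) (x : α) (L R : List α)
    (h : ∀ r ∈ R, b x r = true) :
    PySem.List.insertBy b x (L ++ R) = PySem.List.insertBy b x L ++ R := by
  induction L with
  | nil =>
    cases R with
    | nil => rfl
    | cons r rs => simp [PySem.List.insertBy, h r (by simp)]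
  | cons y ys ih =>
    by_cases hb : b x y = true
    · simp [PySem.List.insertBy, hb]
    · simp only [Bool.not_eq_true] at hb
      simp [PySem.List.insertBy, hb, ih]

-- x goes after all of L: it is inserted within the right block
theorem insertBy_append_of_not_before {α : Type} (b : α → α → Bool) (x : α) (L R : List α)
    (h : ∀ l ∈ L, b x l = false) :
    PySem.List.insertBy b x (L ++ R) = L ++ PySem.List.insertBy b x R := by
  induction L with
  | nil => rfl
  | cons y ys ih =>
    simp [PySem.List.insertBy, h y (by simp), ih (fun l hl => h l (by simp [hl]))]

-- the stable insertion sort with leading Bool key (!p) keeps the p-block strictly left of the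
-- !p-block and sorts each block by k2 alone
theorem foldl_insert_split (p : String → Bool) (k2 : String → String) :
    ∀ (xs L R : List String), (∀ l ∈ L, p l = true) → (∀ r ∈ R, p r = false) →
      xs.foldl (fun acc x => PySem.List.insertBy
          (fun a b => decide ((!p a) < (!p b)) || !decide ((!p b) < (!p a)) && decide (k2 a < k2 b)) x acc) (L ++ R)
      = (xs.filter p).foldl (fun acc x => PySem.List.insertBy (fun a b => decide (k2 a < k2 b)) x acc) L
        ++ (xs.filter (fun x => !p x)).foldl (fun acc x => PySem.List.insertBy (fun a b => decide (k2 a < k2 b)) x acc) R := by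
  intro xs
  induction xs with
  | nil => intro L R _ _; simp
  | cons x xs ih =>
    intro L R hL hR
    simp only [List.foldl_cons, List.filter_cons]
    by_cases hx : p x = true
    · rw [insertBy_append_of_before _ x L R
        (fun r hr => by simp [hx, hR r hr]),
        insertBy_congr _ (fun a b => decide (k2 a < k2 b)) x L
        (fun l hl => by simp [hx, hL l hl])]
      rw [ih (PySem.List.insertBy (fun a b => decide (k2 a < k2 b)) x L) R
        (fun l hl => by
          rcases (PySem.List.mem_insertBy _ x l L).mp hl with h | h
          · exact h ▸ hx
          · exact hL l h) hR]
      simp [hx]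
    · simp only [Bool.not_eq_true] at hx
      rw [insertBy_append_of_not_before _ x L R
        (fun l hl => by simp [hx, hL l hl]),
        insertBy_congr _ (fun a b => decide (k2 a < k2 b)) x R
        (fun r hr => by simp [hx, hR r hr])]
      rw [ih L (PySem.List.insertBy (fun a b => decide (k2 a < k2 b)) x R) hL
        (fun r hr => by
          rcases (PySem.List.mem_insertBy _ x r R).mp hr with h | h
          · exact h ▸ hx
          · exact hR r h)]
      simp [hx]

-- a stable sort by the tuple key (!p, k2) is: the p-bucket sorted by k2, then the rest sorted by k2
theorem sorted2_split (p : String → Bool) (k2 : String → String) (xs : List String) :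
    PySem.List.sorted2 xs (fun x => !p x) k2 false
      = PySem.List.sorted (xs.filter p) k2 false
        ++ PySem.List.sorted (xs.filter (fun x => !p x)) k2 false := by
  rw [PySem.List.sorted_eq_foldl_insertBy, PySem.List.sorted_eq_foldl_insertBy]
  have := foldl_insert_split p k2 xs [] [] (by simp) (by simp)
  simpa [PySem.List.sorted2] using this

-- ===== VERDICT (by name: the statement is the Claim_ definition above) =====
theorem classif_order_columns_py_spec : Claim_equal_classif_order_columns_py := by
  intro cols _
  unfold Spec_classif_order_columns_py classif_order_columns_py classif_order_columns_py_alt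
  simp only [fold_head cols pvKeys [] (by decide) (by simp), List.nil_append, head_alt, tail_eq,
    sorted2_split (fun c => PySem.Str.startswith (PySem.Str.lower c) "nb_") (fun c => PySem.Str.lower c)]
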